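-- pv_equiv track=rewrite | github.com/zlc1004/forsakenGenerator | solver.py | simplify_path
-- ===== SOURCE A (Python) =====
-- def simplify_path(path):
--     """
--     Simplify path to only include turning points (where direction changes).
--     """
--     if len(path) <= 2:
--         return path
--
--     simplified = [path[0]]  # Always include start
--
--     for i in range(1, len(path) - 1):
--         prev_x, prev_y = path[i - 1]
--         curr_x, curr_y = path[i]
--         next_x, next_y = path[i + 1]
--
--         # Calculate directions
--         dir1 = (curr_x - prev_x, curr_y - prev_y)
--         dir2 = (next_x - curr_x, next_y - curr_y)
--
--         # If direction changes, this is a turning point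
--         if dir1 != dir2:
--             simplified.append((curr_x, curr_y))
--
--     simplified.append(path[-1])  # Always include end
--     return simplified
-- ===== SOURCE B (Python) =====
-- def simplify_path(path):
--     if len(path) <= 2:
--         return path
--     dirs = [(b[0] - a[0], b[1] - a[1]) for a, b in zip(path, path[1:])]
--     out = [path[0]]
--     x, y = path[0]
--     i = 0
--     while i < len(dirs):
--         d = dirs[i]
--         j = i
--         while j < len(dirs) and dirs[j] == d:
--             j += 1
--         n = j - i
--         x, y = x + n * d[0], y + n * d[1]
--         out.append((x, y))
--         i = j
--     return out
-- ===== Notes on version B (the rewrite author's own statement) =====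
-- stated objective: alternative
-- what changed: Replaces A's per-interior-point turning test with run-length encoding of the direction sequence: an outer loop skips each maximal run of equal direction vectors at once and synthesizes each output point arithmetically as current position + run_length * direction, instead of testing and selecting individual points from the path.
import Mathlib
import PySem

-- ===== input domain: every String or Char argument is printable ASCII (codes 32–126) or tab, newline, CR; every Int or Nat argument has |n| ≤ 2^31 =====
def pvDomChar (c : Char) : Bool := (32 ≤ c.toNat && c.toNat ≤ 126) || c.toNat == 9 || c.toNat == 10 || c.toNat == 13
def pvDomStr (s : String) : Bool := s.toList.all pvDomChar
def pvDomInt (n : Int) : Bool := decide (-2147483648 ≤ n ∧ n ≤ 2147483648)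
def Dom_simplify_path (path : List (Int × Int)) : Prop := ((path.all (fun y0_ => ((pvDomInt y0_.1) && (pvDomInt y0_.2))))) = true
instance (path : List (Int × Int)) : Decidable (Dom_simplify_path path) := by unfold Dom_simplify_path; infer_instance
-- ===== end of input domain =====

-- B replaces A's per-point turning test by run-length encoding of the direction sequence:
-- it skips each maximal run of equal directions at once and synthesizes each output point
-- arithmetically as position + run_length * direction (alternative algorithm, same cost).

-- ===== PORT A =====
def simplify_path (path : List (Int × Int)) : List (Int × Int) :=
  if path.length ≤ 2 then path
  else
    let simplified :=
      (PySem.List.pyRange 1 ((path.length : Int) - 1)).foldl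
        (fun acc i =>
          let prev := PySem.List.pyGetD path (i - 1) (0, 0)
          let curr := PySem.List.pyGetD path i (0, 0)
          let next := PySem.List.pyGetD path (i + 1) (0, 0)
          if (curr.1 - prev.1, curr.2 - prev.2) ≠ (next.1 - curr.1, next.2 - curr.2)
          then acc ++ [curr] else acc)
        [PySem.List.pyGetD path 0 (0, 0)]
    simplified ++ [PySem.List.pyGetD path (-1) (0, 0)]

-- ===== PORT B =====
-- dirs = [(b[0]-a[0], b[1]-a[1]) for a, b in zip(path, path[1:])]
def pvDirs (z : List (Int × Int)) : List (Int × Int) :=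
  List.zipWith (fun a b => (b.1 - a.1, b.2 - a.2)) z z.tail

-- inner while loop: length of the maximal prefix of ds equal to d, and the remainder
def pvRunSplit (d : Int × Int) : List (Int × Int) → Nat × List (Int × Int)
  | [] => (0, [])
  | e :: es => if e = d then ((pvRunSplit d es).1 + 1, (pvRunSplit d es).2) else (0, e :: es)

theorem pvRunSplit_len (d : Int × Int) : ∀ es : List (Int × Int),
    (pvRunSplit d es).2.length ≤ es.length := by
  intro es
  induction es with
  | nil => simp [pvRunSplit]
  | cons e es ih =>
    by_cases h : e = d <;> simp [pvRunSplit, h] <;> omega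

-- outer while loop: consume one maximal run per step, synthesizing its endpoint
def pvRuns (x y : Int) : List (Int × Int) → List (Int × Int)
  | [] => []
  | d :: es =>
    let r := pvRunSplit d es
    let n : Int := (r.1 : Int) + 1
    let x2 := x + n * d.1
    let y2 := y + n * d.2
    (x2, y2) :: pvRuns x2 y2 r.2
termination_by ds => ds.length
decreasing_by
  exact Nat.lt_succ_of_le (pvRunSplit_len d es)

def simplify_path_alt (path : List (Int × Int)) : List (Int × Int) :=
  if path.length ≤ 2 then path
  else
    let dirs := pvDirs path
    let p0 := PySem.List.pyGetD path 0 (0, 0)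
    p0 :: pvRuns p0.1 p0.2 dirs

-- ===== PRECONDITION & SPEC =====
def Spec_simplify_path (path : List (Int × Int)) (out : List (Int × Int)) : Prop := out = simplify_path_alt path
instance (path : List (Int × Int)) (out : List (Int × Int)) : Decidable (Spec_simplify_path path out) := by unfold Spec_simplify_path; infer_instance

-- ===== CLAIM (what is proved, stated in full; the proofs are below) =====
def Claim_equal_simplify_path : Prop := ∀ (path : List (Int × Int)), Dom_simplify_path path → Spec_simplify_path path (simplify_path path)

-- ===== LEMMAS AND PROOFS =====

theorem pv_pyRange_shift (a : Int) (n : Nat) :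
    PySem.List.pyRange a (a + n) = (List.range n).map (fun k : Nat => a + (k : Int)) := by
  induction n generalizing a with
  | zero => simp [PySem.List.pyRange]
  | succ n ih =>
    have h : a + ((n : Int) + 1) = (a + 1) + (n : Int) := by ring
    rw [PySem.List.pyRange_one_cons (by omega)]
    push_cast
    rw [h, ih (a + 1), List.range_succ_eq_map, List.map_cons, List.map_map]
    refine congrArg₂ _ (by simp) ?_
    apply List.map_congr_left; intro k _
    simp; ring

-- points and direction vectors of a path, by index (proof-only helpers)
def pvPt (path : List (Int × Int)) (k : Nat) : Int × Int := path.getD k (0, 0)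
def pvDir (path : List (Int × Int)) (k : Nat) : Int × Int :=
  ((pvPt path (k + 1)).1 - (pvPt path k).1, (pvPt path (k + 1)).2 - (pvPt path k).2)
def pvTriple (path : List (Int × Int)) (k : Nat) : (Int × Int) × ((Int × Int) × (Int × Int)) :=
  (pvPt path (k + 1), (pvDir path k, pvDir path (k + 1)))

-- the A-side loop as a zip/filter over triples (intermediate form)
def pvZipForm (path : List (Int × Int)) : List (Int × Int) :=
  ((path.tail.zip ((pvDirs path).zip (pvDirs path).tail)).filter
    (fun t => t.2.1 ≠ t.2.2)).map Prod.fst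

-- the selected interior turning points, by structural recursion on the path
def pvSelP : List (Int × Int) → List (Int × Int)
  | a :: b :: c :: t =>
    (if (b.1 - a.1, b.2 - a.2) ≠ (c.1 - b.1, c.2 - b.2) then [b] else []) ++ pvSelP (b :: c :: t)
  | _ => []

-- the selected turning points, by recursion on the direction list with a running position
def pvSel (x y : Int) : List (Int × Int) → List (Int × Int)
  | d1 :: d2 :: t =>
    (if d1 ≠ d2 then [(x + d1.1, y + d1.2)] else []) ++ pvSel (x + d1.1) (y + d1.2) (d2 :: t)
  | _ => []

theorem pv_zip_shape (path : List (Int × Int)) (m : Nat) (hm : path.length = m + 3) :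
    path.tail.zip ((pvDirs path).zip (pvDirs path).tail)
      = (List.range (m + 1)).map (pvTriple path) := by
  apply List.ext_getElem
  · simp [pvDirs, hm]
  · intro i h1 h2
    have hi : i < m + 1 := by simpa using h2
    have g0 : path[i]? = some (path[i]'(by omega)) := List.getElem?_eq_getElem (by omega)
    have g1 : path[i + 1]? = some (path[i + 1]'(by omega)) := List.getElem?_eq_getElem (by omega)
    simp [pvDirs, List.getElem_zip, List.getElem_zipWith, List.getElem_tail, pvTriple, pvPt, pvDir,
      g0, g1, hm, hi]

theorem pv_A_eq_zip (path : List (Int × Int)) (h : ¬ path.length ≤ 2) :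
    simplify_path path
      = PySem.List.pyGetD path 0 (0, 0) ::
        (pvZipForm path ++ [PySem.List.pyGetD path (-1) (0, 0)]) := by
  unfold simplify_path
  simp only [if_neg h]
  obtain ⟨m, hm⟩ : ∃ m : Nat, path.length = m + 3 := ⟨path.length - 3, by omega⟩
  have hr : ((path.length : Int) - 1) = (1 : Int) + ((m + 1 : Nat) : Int) := by
    rw [hm]; push_cast; ring
  show (PySem.List.pyRange 1 ((path.length : Int) - 1)).foldl
      (fun acc i =>
        if ((PySem.List.pyGetD path i (0, 0)).1 - (PySem.List.pyGetD path (i - 1) (0, 0)).1,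
            (PySem.List.pyGetD path i (0, 0)).2 - (PySem.List.pyGetD path (i - 1) (0, 0)).2)
           ≠ ((PySem.List.pyGetD path (i + 1) (0, 0)).1 - (PySem.List.pyGetD path i (0, 0)).1,
              (PySem.List.pyGetD path (i + 1) (0, 0)).2 - (PySem.List.pyGetD path i (0, 0)).2)
        then acc ++ [PySem.List.pyGetD path i (0, 0)] else acc)
      [PySem.List.pyGetD path 0 (0, 0)] ++ [PySem.List.pyGetD path (-1) (0, 0)]
    = PySem.List.pyGetD path 0 (0, 0) ::
      (pvZipForm path ++ [PySem.List.pyGetD path (-1) (0, 0)])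
  rw [hr, pv_pyRange_shift, List.foldl_map]
  unfold pvZipForm
  rw [pv_zip_shape path m hm]
  have hcong : ∀ (acc : List (Int × Int)), ∀ k ∈ List.range (m + 1),
      (if ((PySem.List.pyGetD path (1 + (k : Int)) (0, 0)).1 -
              (PySem.List.pyGetD path (1 + (k : Int) - 1) (0, 0)).1,
           (PySem.List.pyGetD path (1 + (k : Int)) (0, 0)).2 -
              (PySem.List.pyGetD path (1 + (k : Int) - 1) (0, 0)).2)
          ≠ ((PySem.List.pyGetD path (1 + (k : Int) + 1) (0, 0)).1 -
              (PySem.List.pyGetD path (1 + (k : Int)) (0, 0)).1,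
             (PySem.List.pyGetD path (1 + (k : Int) + 1) (0, 0)).2 -
              (PySem.List.pyGetD path (1 + (k : Int)) (0, 0)).2)
       then acc ++ [PySem.List.pyGetD path (1 + (k : Int)) (0, 0)] else acc)
      = (if decide (pvDir path k ≠ pvDir path (k + 1)) = true
         then acc ++ [pvPt path (k + 1)] else acc) := by
    intro acc k hk
    have h1 : PySem.List.pyGetD path (1 + (k : Int) - 1) (0, 0) = pvPt path k := by
      rw [show (1 : Int) + (k : Int) - 1 = ((k : Nat) : Int) by ring]
      simp [pvPt]
    have h2 : PySem.List.pyGetD path (1 + (k : Int)) (0, 0) = pvPt path (k + 1) := by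
      rw [show (1 : Int) + (k : Int) = ((k + 1 : Nat) : Int) by push_cast; ring,
        PySem.List.pyGetD_natCast]
      rfl
    have h3 : PySem.List.pyGetD path (1 + (k : Int) + 1) (0, 0) = pvPt path (k + 2) := by
      rw [show (1 : Int) + (k : Int) + 1 = ((k + 2 : Nat) : Int) by push_cast; ring,
        PySem.List.pyGetD_natCast]
      rfl
    rw [h1, h2, h3]
    show (if pvDir path k ≠ pvDir path (k + 1) then acc ++ [pvPt path (k + 1)] else acc) = _
    simp
  rw [PySem.List.foldl_congr_mem _ _ _ _ hcong, PySem.List.foldl_append_if,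
    List.filter_map, List.map_map]
  simp only [List.cons_append, List.nil_append]
  rfl

-- the zip/filter form is the structural selection of turning points
theorem pv_zip_eq_selP : ∀ path : List (Int × Int), pvZipForm path = pvSelP path := by
  intro path
  induction path with
  | nil => rfl
  | cons a rest ih =>
    match rest, ih with
    | [], _ => rfl
    | [b], _ => rfl
    | b :: c :: t, ih =>
      show pvZipForm (a :: b :: c :: t) = pvSelP (a :: b :: c :: t)
      have hd : pvDirs (a :: b :: c :: t)
          = (b.1 - a.1, b.2 - a.2) :: pvDirs (b :: c :: t) := by
        simp [pvDirs]
      have hd2 : pvDirs (b :: c :: t) = (c.1 - b.1, c.2 - b.2) :: pvDirs (c :: t) := by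
        simp [pvDirs]
      rw [show pvSelP (a :: b :: c :: t)
          = (if (b.1 - a.1, b.2 - a.2) ≠ (c.1 - b.1, c.2 - b.2) then [b] else [])
            ++ pvSelP (b :: c :: t) from rfl, ← ih]
      unfold pvZipForm
      rw [hd, hd2]
      simp only [List.tail_cons, List.zip_cons_cons, List.filter_cons, List.map_cons]
      by_cases hne : (b.1 - a.1, b.2 - a.2) = (c.1 - b.1, c.2 - b.2) <;>
        simp [hne]

-- runSplit decomposition: es = replicate k d ++ rest, with rest not starting with d
theorem pv_runSplit_eq (d : Int × Int) : ∀ es : List (Int × Int),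
    es = List.replicate (pvRunSplit d es).1 d ++ (pvRunSplit d es).2 := by
  intro es
  induction es with
  | nil => rfl
  | cons e es ih =>
    by_cases h : e = d
    · subst h
      simp only [pvRunSplit, if_pos rfl, List.replicate_succ, List.cons_append]
      exact congrArg (List.cons e) ih
    · simp [pvRunSplit, h]

theorem pv_runSplit_head (d : Int × Int) : ∀ es e t,
    (pvRunSplit d es).2 = e :: t → e ≠ d := by
  intro es
  induction es with
  | nil => intro e t h; simp [pvRunSplit] at h
  | cons f es ih =>
    intro e t h
    by_cases hf : f = d
    · simp [pvRunSplit, hf] at h; exact ih e t h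
    · simp [pvRunSplit, hf] at h; rw [← h.1]; exact hf

-- skipping a run of equal directions leaves the selection unchanged
theorem pv_sel_replicate (d : Int × Int) (rest : List (Int × Int)) :
    ∀ (k : Nat) (x y : Int),
      pvSel x y (d :: (List.replicate k d ++ rest))
        = pvSel (x + (k : Int) * d.1) (y + (k : Int) * d.2) (d :: rest) := by
  intro k
  induction k with
  | zero => intro x y; simp
  | succ k ih =>
    intro x y
    rw [List.replicate_succ, List.cons_append,
      show pvSel x y (d :: d :: (List.replicate k d ++ rest))
        = (if d ≠ d then [(x + d.1, y + d.2)] else [])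
          ++ pvSel (x + d.1) (y + d.2) (d :: (List.replicate k d ++ rest)) from rfl]
    simp only [ne_eq, not_true_eq_false, if_neg, ite_false, List.nil_append, not_false_eq_true]
    rw [ih]
    congr 1 <;> push_cast <;> ring

theorem pv_sum_replicate (d : Int × Int) (rest : List (Int × Int)) (k : Nat)
    (f : Int × Int → Int) :
    (((List.replicate k d ++ rest).map f).sum) = (k : Int) * f d + ((rest.map f).sum) := by
  induction k with
  | zero => simp
  | succ k ih =>
    rw [List.replicate_succ, List.cons_append, List.map_cons, List.sum_cons, ih]
    push_cast; ring

-- the RLE loop computes the selected turning points followed by the final endpoint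
theorem pv_runs_eq_sel_aux : ∀ (n : Nat) (ds : List (Int × Int)) (x y : Int),
    ds.length ≤ n → ds ≠ [] →
    pvRuns x y ds
      = pvSel x y ds ++ [(x + ((ds.map Prod.fst).sum), y + ((ds.map Prod.snd).sum))] := by
  intro n
  induction n with
  | zero =>
    intro ds x y hlen hne
    match ds with
    | [] => exact absurd rfl hne
    | d :: es => simp at hlen
  | succ n IH =>
    intro ds
    match ds with
    | [] => intro x y _ hne; exact absurd rfl hne
    | d :: es =>
      intro x y hn _
      obtain ⟨k, rest, hkr⟩ : ∃ k rest, pvRunSplit d es = (k, rest) := ⟨_, _, rfl⟩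
      have hk1 : (pvRunSplit d es).1 = k := by rw [hkr]
      have hk2 : (pvRunSplit d es).2 = rest := by rw [hkr]
      have hes : es = List.replicate k d ++ rest := by
        have h := pv_runSplit_eq d es
        rw [hk1, hk2] at h
        exact h
      have hstep : pvRuns x y (d :: es)
          = (x + ((k : Int) + 1) * d.1, y + ((k : Int) + 1) * d.2) ::
            pvRuns (x + ((k : Int) + 1) * d.1) (y + ((k : Int) + 1) * d.2) rest := by
        simp only [pvRuns, hk1, hk2]
      have hsel : pvSel x y (d :: es)
          = pvSel (x + (k : Int) * d.1) (y + (k : Int) * d.2) (d :: rest) := by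
        conv_lhs => rw [hes]
        exact pv_sel_replicate d rest k x y
      have hsum1 : ((d :: es).map Prod.fst).sum
          = ((k : Int) + 1) * d.1 + (rest.map Prod.fst).sum := by
        conv_lhs => rw [hes]
        rw [List.map_cons, List.sum_cons, pv_sum_replicate]
        ring
      have hsum2 : ((d :: es).map Prod.snd).sum
          = ((k : Int) + 1) * d.2 + (rest.map Prod.snd).sum := by
        conv_lhs => rw [hes]
        rw [List.map_cons, List.sum_cons, pv_sum_replicate]
        ring
      rw [hstep, hsel, hsum1, hsum2]
      cases rest with
      | nil =>
        rw [show pvRuns (x + ((k : Int) + 1) * d.1) (y + ((k : Int) + 1) * d.2) [] = []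
            from by simp [pvRuns],
          show pvSel (x + (k : Int) * d.1) (y + (k : Int) * d.2) [d] = [] from rfl]
        simp only [List.map_nil, List.sum_nil, List.nil_append]
        congr 2 <;> ring
      | cons e t =>
        have hed : e ≠ d := pv_runSplit_head d es e t hk2
        have hlen : (e :: t).length ≤ n := by
          have hl := pvRunSplit_len d es
          rw [hk2] at hl
          simp only [List.length_cons] at hl hn ⊢
          omega
        have ihr := IH (e :: t) (x + ((k : Int) + 1) * d.1) (y + ((k : Int) + 1) * d.2)
          hlen (by simp)
        rw [ihr,
          show pvSel (x + (k : Int) * d.1) (y + (k : Int) * d.2) (d :: e :: t)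
            = (if d ≠ e then [(x + (k : Int) * d.1 + d.1, y + (k : Int) * d.2 + d.2)] else [])
              ++ pvSel (x + (k : Int) * d.1 + d.1) (y + (k : Int) * d.2 + d.2) (e :: t)
            from rfl,
          if_pos (Ne.symm hed),
          show x + (k : Int) * d.1 + d.1 = x + ((k : Int) + 1) * d.1 from by ring,
          show y + (k : Int) * d.2 + d.2 = y + ((k : Int) + 1) * d.2 from by ring]
        simp only [List.cons_append, List.nil_append, List.append_assoc]
        congr 3 <;> ring

theorem pv_runs_eq_sel (ds : List (Int × Int)) (x y : Int) (h : ds ≠ []) :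
    pvRuns x y ds
      = pvSel x y ds ++ [(x + ((ds.map Prod.fst).sum), y + ((ds.map Prod.snd).sum))] :=
  pv_runs_eq_sel_aux ds.length ds x y le_rfl h

-- the direction-list selection matches the structural path selection
theorem pv_sel_eq_selP : ∀ (rest : List (Int × Int)) (a : Int × Int),
    pvSel a.1 a.2 (pvDirs (a :: rest)) = pvSelP (a :: rest) := by
  intro rest
  induction rest with
  | nil => intro a; rfl
  | cons b rest' ih =>
    intro a
    match rest' with
    | [] => rfl
    | c :: t =>
      have hd : pvDirs (a :: b :: c :: t)
          = (b.1 - a.1, b.2 - a.2) :: pvDirs (b :: c :: t) := by simp [pvDirs]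
      have hd2 : pvDirs (b :: c :: t) = (c.1 - b.1, c.2 - b.2) :: pvDirs (c :: t) := by
        simp [pvDirs]
      rw [hd]
      conv_lhs => rw [hd2]
      rw [show pvSel a.1 a.2 ((b.1 - a.1, b.2 - a.2) :: (c.1 - b.1, c.2 - b.2) :: pvDirs (c :: t))
          = (if (b.1 - a.1, b.2 - a.2) ≠ (c.1 - b.1, c.2 - b.2)
             then [(a.1 + (b.1 - a.1), a.2 + (b.2 - a.2))] else [])
            ++ pvSel (a.1 + (b.1 - a.1)) (a.2 + (b.2 - a.2))
                ((c.1 - b.1, c.2 - b.2) :: pvDirs (c :: t)) from rfl]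
      rw [show a.1 + (b.1 - a.1) = b.1 by ring, show a.2 + (b.2 - a.2) = b.2 by ring, ← hd2]
      rw [ih b]
      rfl

-- the final synthesized endpoint is the last point of the path
theorem pv_end_eq_last : ∀ (rest : List (Int × Int)) (a : Int × Int) (h : rest ≠ []),
    (a.1 + (((pvDirs (a :: rest)).map Prod.fst).sum),
     a.2 + (((pvDirs (a :: rest)).map Prod.snd).sum))
      = rest.getLast h := by
  intro rest
  induction rest with
  | nil => intro a h; exact absurd rfl h
  | cons b t ih =>
    intro a h
    have hd : pvDirs (a :: b :: t) = (b.1 - a.1, b.2 - a.2) :: pvDirs (b :: t) := by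
      simp [pvDirs]
    rw [hd]
    match t with
    | [] => simp [pvDirs]
    | c :: t' =>
      have := ih b (by simp)
      simp only [List.map_cons, List.sum_cons]
      rw [show a.1 + (b.1 - a.1 + ((pvDirs (b :: c :: t')).map Prod.fst).sum)
          = b.1 + ((pvDirs (b :: c :: t')).map Prod.fst).sum by ring,
        show a.2 + (b.2 - a.2 + ((pvDirs (b :: c :: t')).map Prod.snd).sum)
          = b.2 + ((pvDirs (b :: c :: t')).map Prod.snd).sum by ring]
      rw [this]
      simp [List.getLast]

-- ===== VERDICT (by name: the statement is the Claim_ definition above) =====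
theorem simplify_path_spec : Claim_equal_simplify_path := by
  intro path _
  unfold Spec_simplify_path
  by_cases h : path.length ≤ 2
  · unfold simplify_path simplify_path_alt
    simp [h]
  · rw [pv_A_eq_zip path h]
    unfold simplify_path_alt
    simp only [if_neg h]
    match path, h with
    | [], h => exact absurd (by simp) h
    | [a], h => exact absurd (by simp) h
    | a :: b :: rest, h =>
      have hr : b :: rest ≠ [] := by simp
      have hdne : pvDirs (a :: b :: rest) ≠ [] := by simp [pvDirs]
      have h0 : PySem.List.pyGetD (a :: b :: rest) 0 ((0 : Int), (0 : Int)) = a :=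
        PySem.List.pyGetD_zero_cons a (b :: rest) ((0 : Int), (0 : Int))
      have hlast : PySem.List.pyGetD (a :: b :: rest) (-1) ((0 : Int), (0 : Int))
          = (b :: rest).getLast hr := by
        rw [PySem.List.pyGetD_neg_one (a :: b :: rest) ((0 : Int), (0 : Int)) (by simp)]
        exact List.getLast_cons (a := a) hr
      rw [h0, hlast]
      show a :: (pvZipForm (a :: b :: rest) ++ [(b :: rest).getLast hr])
          = a :: pvRuns a.1 a.2 (pvDirs (a :: b :: rest))
      rw [pv_runs_eq_sel _ _ _ hdne, pv_sel_eq_selP (b :: rest) a,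
        pv_zip_eq_selP, pv_end_eq_last (b :: rest) a hr]
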